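-- pv_equiv track=rewrite | github.com/ansara/persephone | persephone/pipeline/nlp.py | sanitize_words
-- ===== SOURCE A (Python) =====
-- SLANG_DICT = {
--     "a": "4",
--     "b": "8",
--     "e": "3",
--     "g": "6",
--     "i": "1",
--     "o": "0",
--     "t": "7",
--     "z": "2",
--     "l": "!",
--     "s": "$",
-- }
--
-- def sanitize_words(text_list):
--
--     # translate slang
--     for word in text_list:
--         temp_word = word
--         if temp_word[-1] == "1":
--             temp_word = temp_word[:-1] + "one"
--
--         for letter in SLANG_DICT:
--             temp_word = temp_word.replace(SLANG_DICT[letter], letter)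
--
--         text_list[text_list.index(word)] = temp_word
--
--     text_list = " ".join(text_list)
--     return text_list
-- ===== SOURCE B (Python) =====
-- LEET_TO_LETTER = {"4": "a", "8": "b", "3": "e", "6": "g", "1": "i",
--                   "0": "o", "7": "t", "2": "z", "!": "l", "$": "s"}
--
-- def sanitize_words(text_list):
--     # One pass per word via a char->char table; no in-place list rewriting, no list.index scans.
--     out = []
--     for word in text_list:
--         if word.endswith("1"):
--             word = word[:-1] + "one"
--         out.append("".join(LEET_TO_LETTER.get(c, c) for c in word))
--     return " ".join(out)
-- ===== Notes on version B (the rewrite author's own statement) =====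
-- stated objective: faster
-- what changed: B translates each word in one pass through a leet->letter char table and joins, instead of A's in-place list rewriting via list.index first-match lookups and ten str.replace passes per word.
-- crash fix: A raises IndexError (word[-1]) whenever the list contains an empty string; B returns the sanitized sentence with the empty word kept empty. — e.g. on sanitize_words([""]): A raises IndexError, B returns ""
import Mathlib
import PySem

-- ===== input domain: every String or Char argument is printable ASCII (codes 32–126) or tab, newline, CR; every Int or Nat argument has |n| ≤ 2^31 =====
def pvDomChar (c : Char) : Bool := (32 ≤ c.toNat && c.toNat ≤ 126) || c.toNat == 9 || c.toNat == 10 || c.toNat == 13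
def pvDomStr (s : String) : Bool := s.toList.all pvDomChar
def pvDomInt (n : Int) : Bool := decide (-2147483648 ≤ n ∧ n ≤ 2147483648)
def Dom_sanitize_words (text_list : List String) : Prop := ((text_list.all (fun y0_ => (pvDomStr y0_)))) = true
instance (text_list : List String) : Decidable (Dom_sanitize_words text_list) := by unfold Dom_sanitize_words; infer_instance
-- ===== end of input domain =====

-- B replaces A's mutate-in-place loop with list.index lookups and ten str.replace passes per word
-- by one char-table pass per word; equivalence is about the RETURN value only: Python A also
-- mutates its argument list in place, B does not.

-- ===== PORT A =====
def SLANG_DICT : List (String × String) :=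
  [("a","4"),("b","8"),("e","3"),("g","6"),("i","1"),("o","0"),("t","7"),("z","2"),("l","!"),("s","$")]

-- the body of A's outer loop applied to one word (the `temp_word` computation)
def pvWordA (word : String) : String :=
  let temp := if PySem.Str.pyGet? word (-1) = some '1'
              then PySem.Str.slice word none (some (-1)) ++ "one"
              else word
  SLANG_DICT.foldl (fun t kv => PySem.Str.replace t kv.2 kv.1) temp

-- one iteration of `for word in text_list: ... text_list[text_list.index(word)] = temp_word`;
-- the `none` branches are totality guards only (i < len(lst) and word ∈ lst always hold)
def pvStepA (lst : List String) (i : Nat) : List String :=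
  match PySem.List.pyGet? lst (i : Int) with
  | none => lst
  | some word =>
    match PySem.List.index? lst word with
    | none => lst
    | some j => lst.set j (pvWordA word)

def sanitize_words (text_list : List String) : String :=
  PySem.Str.join " " ((List.range text_list.length).foldl pvStepA text_list)

-- ===== PORT B =====
def LEET_TO_LETTER : List (Char × Char) :=
  [('4','a'),('8','b'),('3','e'),('6','g'),('1','i'),('0','o'),('7','t'),('2','z'),('!','l'),('$','s')]

-- LEET_TO_LETTER.get(c, c)
def pvCharB (c : Char) : Char := (LEET_TO_LETTER.lookup c).getD c

def pvWordB (word : String) : String :=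
  let w := if PySem.Str.endswith word "1"
           then PySem.Str.slice word none (some (-1)) ++ "one"
           else word
  String.ofList (w.toList.map pvCharB)

def sanitize_words_alt (text_list : List String) : String :=
  PySem.Str.join " " (text_list.map pvWordB)

-- ===== PRECONDITION & SPEC =====
-- Pre_ excludes lists containing the empty string: there Python A raises IndexError at word[-1].
def Pre_sanitize_words (text_list : List String) : Prop := ∀ w ∈ text_list, w ≠ ""
instance (text_list : List String) : Decidable (Pre_sanitize_words text_list) := by
  unfold Pre_sanitize_words; infer_instance

def pvWitness_sanitize_words : List String := ["l33t", "c0d3", "w1n1"]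

-- A raises IndexError exactly when some word is the empty string; B returns the sanitized
-- sentence with the empty word kept empty.
def Raises_sanitize_words (text_list : List String) : Prop := "" ∈ text_list
instance (text_list : List String) : Decidable (Raises_sanitize_words text_list) := by
  unfold Raises_sanitize_words; infer_instance
def pvRaiseWitness_sanitize_words : List String := [""]
def pvRaiseWitnessOut_sanitize_words : String := ""

def Spec_sanitize_words (text_list : List String) (out : String) : Prop := out = sanitize_words_alt text_list
instance (text_list : List String) (out : String) : Decidable (Spec_sanitize_words text_list out) := by
  unfold Spec_sanitize_words; infer_instance

-- ===== CLAIM (what is proved, stated in full; the proofs are below) =====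
def Claim_equal_sanitize_words : Prop := ∀ (text_list : List String), Dom_sanitize_words text_list → Pre_sanitize_words text_list → Spec_sanitize_words text_list (sanitize_words text_list)
def Claim_raises_sanitize_words : Prop := (∀ (text_list : List String), Dom_sanitize_words text_list → Raises_sanitize_words text_list → ¬ Pre_sanitize_words text_list) ∧ (Dom_sanitize_words (pvRaiseWitness_sanitize_words) ∧ Raises_sanitize_words (pvRaiseWitness_sanitize_words) ∧ sanitize_words_alt (pvRaiseWitness_sanitize_words) = pvRaiseWitnessOut_sanitize_words)

-- ===== LEMMAS AND PROOFS =====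

-- replacing a single-char pattern by a single-char string is a character map
def pvSub (a b c : Char) : Char := if c = a then b else c

theorem pvGo_single (a b : Char) : ∀ (l : List Char) (fuel : Nat) (acc : List Char),
    l.length ≤ fuel →
    PySem.Chars.replace.go [a] [b] fuel l acc = acc.reverse ++ l.map (pvSub a b) := by
  intro l
  induction l with
  | nil => intro fuel acc _; cases fuel <;> simp [PySem.Chars.replace.go]
  | cons c t ih =>
    intro fuel acc hle
    cases fuel with
    | zero => simp at hle
    | succ f =>
      rw [PySem.Chars.replace.go]
      by_cases hca : c = a
      · subst hca
        simp only [List.isPrefixOf, BEq.rfl, Bool.true_and, if_true]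
        have hd : List.drop [c].length (c :: t) = t := by simp
        rw [hd, ih f _ (by simpa using hle)]
        simp [pvSub]
      · have hpre : [a].isPrefixOf (c :: t) = false := by
          simp [List.isPrefixOf]; exact fun h => absurd h.symm hca
        rw [hpre]
        simp only [Bool.false_eq_true, if_false]
        rw [ih f _ (by simpa using hle)]
        simp [pvSub, hca]

theorem pvReplace_single (a b : Char) (cs : List Char) :
    PySem.Chars.replace cs [a] [b] = cs.map (pvSub a b) := by
  rw [PySem.Chars.replace]
  simp [pvGo_single a b cs cs.length [] le_rfl]

-- the ten chained substitutions act per character as B's table lookup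
theorem pvChain_eq_charB (c : Char) :
    pvSub '$' 's' (pvSub '!' 'l' (pvSub '2' 'z' (pvSub '7' 't' (pvSub '0' 'o' (pvSub '1' 'i'
      (pvSub '6' 'g' (pvSub '3' 'e' (pvSub '8' 'b' (pvSub '4' 'a' c))))))))) = pvCharB c := by
  by_cases h4 : c = '4'; · subst h4; decide
  by_cases h8 : c = '8'; · subst h8; decide
  by_cases h3 : c = '3'; · subst h3; decide
  by_cases h6 : c = '6'; · subst h6; decide
  by_cases h1 : c = '1'; · subst h1; decide
  by_cases h0 : c = '0'; · subst h0; decide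
  by_cases h7 : c = '7'; · subst h7; decide
  by_cases h2 : c = '2'; · subst h2; decide
  by_cases hx : c = '!'; · subst hx; decide
  by_cases hs : c = '$'; · subst hs; decide
  have hb4 : (c == '4') = false := by simp [h4]
  have hb8 : (c == '8') = false := by simp [h8]
  have hb3 : (c == '3') = false := by simp [h3]
  have hb6 : (c == '6') = false := by simp [h6]
  have hb1 : (c == '1') = false := by simp [h1]
  have hb0 : (c == '0') = false := by simp [h0]
  have hb7 : (c == '7') = false := by simp [h7]
  have hb2 : (c == '2') = false := by simp [h2]
  have hbx : (c == '!') = false := by simp [hx]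
  have hbs : (c == '$') = false := by simp [hs]
  simp only [pvSub, pvCharB, LEET_TO_LETTER, List.lookup, hb4, hb8, hb3, hb6, hb1, hb0, hb7, hb2, hbx, hbs]
  simp [h4, h8, h3, h6, h1, h0, h7, h2, hx, hs]

-- B's table never outputs a leet character (so B's word map is idempotent)
theorem pvCharB_not_leet (c : Char) : LEET_TO_LETTER.lookup (pvCharB c) = none ∧ pvCharB c ≠ '1' := by
  by_cases h4 : c = '4'; · subst h4; decide
  by_cases h8 : c = '8'; · subst h8; decide
  by_cases h3 : c = '3'; · subst h3; decide
  by_cases h6 : c = '6'; · subst h6; decide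
  by_cases h1 : c = '1'; · subst h1; decide
  by_cases h0 : c = '0'; · subst h0; decide
  by_cases h7 : c = '7'; · subst h7; decide
  by_cases h2 : c = '2'; · subst h2; decide
  by_cases hx : c = '!'; · subst hx; decide
  by_cases hs : c = '$'; · subst hs; decide
  have hb4 : (c == '4') = false := by simp [h4]
  have hb8 : (c == '8') = false := by simp [h8]
  have hb3 : (c == '3') = false := by simp [h3]
  have hb6 : (c == '6') = false := by simp [h6]
  have hb1 : (c == '1') = false := by simp [h1]
  have hb0 : (c == '0') = false := by simp [h0]
  have hb7 : (c == '7') = false := by simp [h7]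
  have hb2 : (c == '2') = false := by simp [h2]
  have hbx : (c == '!') = false := by simp [hx]
  have hbs : (c == '$') = false := by simp [hs]
  have hc : pvCharB c = c := by
    simp only [pvCharB, LEET_TO_LETTER, List.lookup, hb4, hb8, hb3, hb6, hb1, hb0, hb7, hb2, hbx, hbs]
    rfl
  rw [hc]
  refine ⟨?_, h1⟩
  simp only [LEET_TO_LETTER, List.lookup, hb4, hb8, hb3, hb6, hb1, hb0, hb7, hb2, hbx, hbs]

theorem pvFold_expand (u : String) :
    SLANG_DICT.foldl (fun t kv => PySem.Str.replace t kv.2 kv.1) u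
      = PySem.Str.replace (PySem.Str.replace (PySem.Str.replace (PySem.Str.replace
        (PySem.Str.replace (PySem.Str.replace (PySem.Str.replace (PySem.Str.replace
        (PySem.Str.replace (PySem.Str.replace u "4" "a") "8" "b") "3" "e") "6" "g")
        "1" "i") "0" "o") "7" "t") "2" "z") "!" "l") "$" "s" := by
  simp only [SLANG_DICT, List.foldl_cons, List.foldl_nil]

theorem pvFold_toList (u : String) :
    (PySem.Str.replace (PySem.Str.replace (PySem.Str.replace (PySem.Str.replace
        (PySem.Str.replace (PySem.Str.replace (PySem.Str.replace (PySem.Str.replace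
        (PySem.Str.replace (PySem.Str.replace u "4" "a") "8" "b") "3" "e") "6" "g")
        "1" "i") "0" "o") "7" "t") "2" "z") "!" "l") "$" "s").toList
      = u.toList.map pvCharB := by
  simp only [PySem.Str.toList_replace]
  rw [show ("4" : String).toList = ['4'] from rfl, show ("a" : String).toList = ['a'] from rfl,
      show ("8" : String).toList = ['8'] from rfl, show ("b" : String).toList = ['b'] from rfl,
      show ("3" : String).toList = ['3'] from rfl, show ("e" : String).toList = ['e'] from rfl,
      show ("6" : String).toList = ['6'] from rfl, show ("g" : String).toList = ['g'] from rfl,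
      show ("1" : String).toList = ['1'] from rfl, show ("i" : String).toList = ['i'] from rfl,
      show ("0" : String).toList = ['0'] from rfl, show ("o" : String).toList = ['o'] from rfl,
      show ("7" : String).toList = ['7'] from rfl, show ("t" : String).toList = ['t'] from rfl,
      show ("2" : String).toList = ['2'] from rfl, show ("z" : String).toList = ['z'] from rfl,
      show ("!" : String).toList = ['!'] from rfl, show ("l" : String).toList = ['l'] from rfl,
      show ("$" : String).toList = ['$'] from rfl, show ("s" : String).toList = ['s'] from rfl]
  simp only [pvReplace_single, List.map_map]
  apply List.map_congr_left
  intro c _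
  simp only [Function.comp_apply]
  exact pvChain_eq_charB c

-- `word[-1] == "1"` and `word.endswith("1")` agree
theorem pvCond_eq (w : String) :
    (PySem.Str.pyGet? w (-1) = some '1') ↔ PySem.Str.endswith w "1" = true := by
  have h1 : ("1" : String).toList = ['1'] := rfl
  simp only [PySem.Str.pyGet?_eq, PySem.Chars.pyGet?_eq_listPyGet?, PySem.List.pyGet?_neg_one,
    PySem.Str.endswith_eq, PySem.Chars.endswith, h1, List.isSuffixOf_iff_suffix]
  constructor
  · intro h
    rcases List.getLast?_eq_some_iff.mp h with ⟨ys, hys⟩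
    exact ⟨ys, hys.symm⟩
  · rintro ⟨ys, hys⟩
    exact List.getLast?_eq_some_iff.mpr ⟨ys, hys.symm⟩

-- A's per-word transformation is B's
theorem pvWordA_eq_pvWordB (w : String) : pvWordA w = pvWordB w := by
  unfold pvWordA pvWordB
  rw [if_congr (pvCond_eq w) rfl rfl]
  rw [pvFold_expand]
  apply String.toList_inj.mp
  rw [pvFold_toList, String.toList_ofList]

theorem pvCharB_idem (c : Char) : pvCharB (pvCharB c) = pvCharB c := by
  conv_lhs => rw [pvCharB]
  rw [(pvCharB_not_leet c).1]
  rfl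

-- B's per-word transformation is idempotent
theorem pvWordB_idem (w : String) : pvWordB (pvWordB w) = pvWordB w := by
  have hlist : (pvWordB w).toList = ((if PySem.Str.endswith w "1"
      then PySem.Str.slice w none (some (-1)) ++ "one" else w).toList).map pvCharB := by
    unfold pvWordB; simp
  have hend : PySem.Str.endswith (pvWordB w) "1" = false := by
    have h1 : ("1" : String).toList = ['1'] := rfl
    rw [PySem.Str.endswith_eq, PySem.Chars.endswith, h1]
    rw [Bool.eq_false_iff]
    intro hsuf
    have hsuf' := List.isSuffixOf_iff_suffix.mp hsuf
    have hlast : (pvWordB w).toList.getLast? = some '1' := by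
      rcases hsuf' with ⟨ys, hys⟩
      exact List.getLast?_eq_some_iff.mpr ⟨ys, hys.symm⟩
    rw [hlist, List.getLast?_map] at hlast
    rcases Option.map_eq_some_iff.mp hlast with ⟨c, _, hc⟩
    exact (pvCharB_not_leet c).2 hc
  conv_lhs => rw [pvWordB]
  rw [hend]
  simp only [Bool.false_eq_true, if_false, hlist, List.map_map]
  have hcomp : (pvCharB ∘ pvCharB) = pvCharB := funext pvCharB_idem
  rw [hcomp, ← hlist, String.ofList_toList]

-- one loop step keeps the invariant: translated prefix, untouched suffix
theorem pvStep_inv (xs : List String) (i : Nat) (hi : i < xs.length) :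
    pvStepA ((xs.take i).map pvWordB ++ xs.drop i) i
      = (xs.take (i + 1)).map pvWordB ++ xs.drop (i + 1) := by
  have hlen_pre : ((xs.take i).map pvWordB).length = i := by
    simp [List.length_take, Nat.min_eq_left hi.le]
  have hdrop : xs.drop i = xs[i] :: xs.drop (i + 1) := List.drop_eq_getElem_cons hi
  have htake : (xs.take (i + 1)).map pvWordB = (xs.take i).map pvWordB ++ [pvWordB xs[i]] := by
    rw [List.take_add_one, List.getElem?_eq_getElem hi]
    simp only [Option.toList_some, List.map_append, List.map_cons, List.map_nil]
  have hget : PySem.List.pyGet? ((xs.take i).map pvWordB ++ xs.drop i) (i : Int)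
      = some xs[i] := by
    rw [PySem.List.pyGet?_natCast, List.getElem?_append_right (by omega), hlen_pre,
      Nat.sub_self, hdrop]
    rfl
  unfold pvStepA
  rw [hget]
  dsimp only
  by_cases hmem : xs[i] ∈ (xs.take i).map pvWordB
  · -- xs[i] is already a translated word, hence a fixed point of pvWordB
    rcases List.mem_map.mp hmem with ⟨y, _, hy⟩
    have hfix : pvWordB xs[i] = xs[i] := by rw [← hy, pvWordB_idem]
    have htgt : (xs.take (i + 1)).map pvWordB ++ xs.drop (i + 1)
        = (xs.take i).map pvWordB ++ xs.drop i := by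
      rw [htake, hfix, hdrop]
      simp
    cases hidx : PySem.List.index? ((xs.take i).map pvWordB ++ xs.drop i) xs[i] with
    | none => rw [htgt]
    | some j =>
      rcases PySem.List.getElem_of_index?_eq_some hidx with ⟨hk, hkv, _⟩
      dsimp only
      rw [pvWordA_eq_pvWordB, hfix, ← hkv, List.set_getElem_self, htgt]
  · -- first occurrence of xs[i] is position i itself
    have hidx : PySem.List.index? ((xs.take i).map pvWordB ++ xs.drop i) xs[i] = some i := by
      apply (PySem.List.index?_eq_some_iff _ _ _).mpr
      exact ⟨(xs.take i).map pvWordB, xs.drop (i + 1), by rw [hdrop], hlen_pre, hmem⟩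
    rw [hidx]
    dsimp only
    rw [pvWordA_eq_pvWordB, hdrop, List.set_append_right _ _ (by omega), htake]
    simp only [List.append_assoc, List.singleton_append]
    rw [show i - (List.map pvWordB (List.take i xs)).length = 0 from by omega, List.set_cons_zero]

theorem pvLoop_inv (xs : List String) : ∀ i, i ≤ xs.length →
    (List.range i).foldl pvStepA xs = (xs.take i).map pvWordB ++ xs.drop i := by
  intro i
  induction i with
  | zero => intro _; simp
  | succ i ih =>
    intro hle
    rw [List.range_succ, List.foldl_append, ih (by omega)]
    simpa using pvStep_inv xs i (by omega)

-- ===== VERDICT (by name: the statement is the Claim_ definition above) =====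
theorem sanitize_words_spec : Claim_equal_sanitize_words := by
  intro xs _ _
  unfold Spec_sanitize_words sanitize_words sanitize_words_alt
  rw [pvLoop_inv xs xs.length le_rfl]
  simp

@[simp] theorem sanitize_words_raises : Claim_raises_sanitize_words := by
  unfold Claim_raises_sanitize_words
  constructor
  · intro xs _ hr hpre; exact hpre "" hr rfl
  · exact ⟨by decide, by decide, by decide⟩
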